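-- pv_equiv track=rewrite | github.com/jenilpatel252525-cyber/python-practice | Project/Leetcode/60.py | count_xor_less_equal_k
-- ===== SOURCE A (Python) =====
-- from collections import defaultdict
--
-- def count_xor_less_equal_k(a, K):
--     count = 0
--     prefix_xor = 0
--     freq = defaultdict(int)
--     freq[0] = 1  # To include subarrays starting from index 0
--
--     for num in a:
--         prefix_xor ^= num
--         for p in freq:
--             if (prefix_xor ^ p) <= K:
--                 count += freq[p]
--         freq[prefix_xor] += 1
--
--     return count
-- ===== SOURCE B (Python) =====
-- def count_xor_less_equal_k(a, K):
--     total = 0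
--     suffix = a
--     while suffix:
--         x = 0
--         for num in suffix:
--             x ^= num
--             if x <= K:
--                 total += 1
--         suffix = suffix[1:]
--     return total
-- ===== Notes on version B (the rewrite author's own statement) =====
-- stated objective: alternative
-- what changed: B enumerates every subarray directly with a running XOR per start position, instead of streaming prefix XORs through a frequency dictionary and scanning its keys.
import Mathlib
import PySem

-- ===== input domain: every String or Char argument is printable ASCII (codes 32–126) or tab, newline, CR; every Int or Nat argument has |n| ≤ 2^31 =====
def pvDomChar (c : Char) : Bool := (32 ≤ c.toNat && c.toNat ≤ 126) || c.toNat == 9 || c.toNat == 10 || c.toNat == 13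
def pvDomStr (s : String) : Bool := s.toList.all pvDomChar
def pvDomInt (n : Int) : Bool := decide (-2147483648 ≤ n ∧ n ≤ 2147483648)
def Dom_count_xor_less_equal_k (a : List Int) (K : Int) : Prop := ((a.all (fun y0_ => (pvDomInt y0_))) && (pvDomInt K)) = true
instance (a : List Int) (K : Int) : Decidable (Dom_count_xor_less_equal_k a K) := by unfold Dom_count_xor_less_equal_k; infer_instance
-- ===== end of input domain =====

-- B counts subarrays with XOR ≤ K by direct enumeration (a running XOR per start position)
-- instead of A's prefix-XOR frequency dictionary; alternative algorithm, similar cost.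

-- ===== PORT A =====
-- loop body of A's 'for num in a' (state: count, prefix_xor, freq)
def pvStepA (K : Int) (s : Int × Int × PySem.Dict Int Int) (num : Int) : Int × Int × PySem.Dict Int Int :=
  let px := PySem.Int.bxor s.2.1 num
  let c := s.2.2.keys.foldl
    (fun c p => if PySem.Int.bxor px p ≤ K then c + s.2.2.getD p 0 else c) s.1
  (c, px, s.2.2.modify px 0 (· + 1))

def count_xor_less_equal_k (a : List Int) (K : Int) : Int :=
  (a.foldl (pvStepA K) (0, 0, (PySem.Dict.empty : PySem.Dict Int Int).insert 0 1)).1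

-- ===== PORT B =====
-- B's 'while suffix' loop; the inner fold is B's 'for num in suffix'
def pvAltGo (K : Int) : List Int → Int → Int
  | [], total => total
  | s@(_ :: rest), total =>
      pvAltGo K rest
        ((s.foldl
          (fun (st : Int × Int) num =>
            let x := PySem.Int.bxor st.1 num
            (x, if x ≤ K then st.2 + 1 else st.2)) ((0 : Int), total)).2)

def count_xor_less_equal_k_alt (a : List Int) (K : Int) : Int := pvAltGo K a 0

-- ===== PRECONDITION & SPEC =====
def Spec_count_xor_less_equal_k (a : List Int) (K : Int) (out : Int) : Prop := out = count_xor_less_equal_k_alt a K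
instance (a : List Int) (K : Int) (out : Int) : Decidable (Spec_count_xor_less_equal_k a K out) := by unfold Spec_count_xor_less_equal_k; infer_instance

-- ===== CLAIM (what is proved, stated in full; the proofs are below) =====
def Claim_equal_count_xor_less_equal_k : Prop := ∀ (a : List Int) (K : Int), Dom_count_xor_less_equal_k a K → Spec_count_xor_less_equal_k a K (count_xor_less_equal_k a K)

-- ===== LEMMAS AND PROOFS =====

-- Sign/magnitude view of Python's infinite two's complement, to get xor algebra.
def pvN (a : Int) : Nat := if 0 ≤ a then a.toNat else (-a - 1).toNat
def pvS (a : Int) : Bool := decide (a < 0)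
def pvEnc (s : Bool) (m : Nat) : Int := if s then -(m : Int) - 1 else (m : Int)

theorem pvBxor_eq_enc (a b : Int) :
    PySem.Int.bxor a b = pvEnc (xor (pvS a) (pvS b)) (pvN a ^^^ pvN b) := by
  unfold PySem.Int.bxor pvEnc pvS pvN
  split_ifs with h1 h2 h2 <;> simp_all <;> omega

theorem pvS_enc (s : Bool) (m : Nat) : pvS (pvEnc s m) = s := by
  cases s <;> simp [pvS, pvEnc] <;> omega

theorem pvN_enc (s : Bool) (m : Nat) : pvN (pvEnc s m) = m := by
  cases s <;> simp [pvN, pvEnc] <;> omega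

theorem pvBxor_assoc (a b c : Int) :
    PySem.Int.bxor (PySem.Int.bxor a b) c = PySem.Int.bxor a (PySem.Int.bxor b c) := by
  simp only [pvBxor_eq_enc, pvS_enc, pvN_enc, Bool.xor_assoc, Nat.xor_assoc]

theorem pvBxor_cancel (x z : Int) : PySem.Int.bxor x (PySem.Int.bxor x z) = z := by
  rw [← pvBxor_assoc, PySem.Int.bxor_self, PySem.Int.bxor_comm, PySem.Int.bxor_zero]

-- prefix xors of a list, seeded at x, excluding the seed itself
def pvPrefsT (x : Int) : List Int → List Int
  | [] => []
  | n :: t => PySem.Int.bxor x n :: pvPrefsT (PySem.Int.bxor x n) t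

-- number of pairs (i < j) in ps with ps[i] xor ps[j] ≤ K, head-first recursion
def pvPairL (K : Int) : List Int → Int
  | [] => 0
  | x :: t => ((t.countP (fun p => decide (PySem.Int.bxor x p ≤ K))) : Int) + pvPairL K t

-- per-start-position count of subarray xors ≤ K
def pvPairS (K : Int) : List Int → Int
  | [] => 0
  | n :: r => (((pvPrefsT 0 (n :: r)).countP (fun y => decide (y ≤ K))) : Int) + pvPairS K r

theorem pvPrefsT_shift (r : List Int) : ∀ x y : Int,
    pvPrefsT (PySem.Int.bxor x y) r = (pvPrefsT y r).map (fun z => PySem.Int.bxor x z) := by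
  induction r with
  | nil => intro x y; rfl
  | cons m r ih =>
      intro x y
      simp only [pvPrefsT, List.map_cons, pvBxor_assoc, ih]

theorem pvPrefsT_map (s : List Int) (x : Int) :
    pvPrefsT x s = (pvPrefsT 0 s).map (fun z => PySem.Int.bxor x z) := by
  have := pvPrefsT_shift s x 0
  rwa [PySem.Int.bxor_zero] at this

theorem pvCount_cancel (s : List Int) (x K : Int) :
    (pvPrefsT x s).countP (fun p => decide (PySem.Int.bxor x p ≤ K))
      = (pvPrefsT 0 s).countP (fun y => decide (y ≤ K)) := by
  rw [pvPrefsT_map s x, List.countP_map]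
  apply List.countP_congr
  intro z _
  simp [Function.comp, pvBxor_cancel]

theorem pvPairL_append (K z : Int) (ps : List Int) :
    pvPairL K (ps ++ [z])
      = pvPairL K ps + ((ps.countP (fun p => decide (PySem.Int.bxor z p ≤ K))) : Int) := by
  induction ps with
  | nil => simp [pvPairL]
  | cons y t ih =>
      simp only [List.cons_append, pvPairL, ih, List.countP_append, List.countP_cons,
        List.countP_nil, PySem.Int.bxor_comm z y]
      push_cast
      ring

theorem pvPairL_eq_pairS (K : Int) : ∀ (s : List Int) (x : Int),
    pvPairL K (x :: pvPrefsT x s) = pvPairS K s := by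
  intro s
  induction s with
  | nil => intro x; simp [pvPairL, pvPairS, pvPrefsT]
  | cons n r ih =>
      intro x
      calc pvPairL K (x :: pvPrefsT x (n :: r))
          = ((pvPrefsT x (n :: r)).countP (fun p => decide (PySem.Int.bxor x p ≤ K)) : Int)
            + pvPairL K (PySem.Int.bxor x n :: pvPrefsT (PySem.Int.bxor x n) r) := rfl
        _ = (((pvPrefsT 0 (n :: r)).countP (fun y => decide (y ≤ K))) : Int) + pvPairS K r := by
            rw [pvCount_cancel (n :: r) x K, ih (PySem.Int.bxor x n)]
        _ = pvPairS K (n :: r) := rfl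

-- Σ_{p ∈ L.filter q} xs.count p = xs.countP q, for L nodup covering xs
theorem pvSum_count_filter (q : Int → Bool) (xs : List Int) : ∀ (L : List Int), L.Nodup →
    (∀ y ∈ xs, y ∈ L) →
    ((L.filter q).map (fun p => ((xs.count p) : Int))).sum = ((xs.countP q) : Int) := by
  induction xs with
  | nil => intro L _ _; simp
  | cons z xs ih =>
      intro L hnd hcov
      have hz : z ∈ L := hcov z (by simp)
      have hcov' : ∀ y ∈ xs, y ∈ L := fun y hy => hcov y (by simp [hy])
      have hsplit : ∀ p : Int, ((z :: xs).count p : Int)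
          = (xs.count p : Int) + (if p = z then (1 : Int) else 0) := by
        intro p
        rcases eq_or_ne p z with h | h
        · subst h; simp
        · simp [h, Ne.symm h]
      have hcnt : ((L.filter q).map (fun p => (if p = z then (1:Int) else 0))).sum
          = ((L.filter q).count z : Int) := by
        induction (L.filter q) with
        | nil => simp
        | cons w t iht =>
            rcases eq_or_ne w z with h | h
            · subst h
              simp only [List.map_cons, List.sum_cons, iht, List.count_cons,
                BEq.rfl, if_true]
              push_cast
              ring
            · simp only [List.map_cons, List.sum_cons, iht, List.count_cons,
                beq_iff_eq, if_neg h]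
              push_cast
              ring
      have hone : ((L.filter q).count z : Int) = if q z then (1:Int) else 0 := by
        by_cases hq : q z
        · rw [if_pos hq, List.count_eq_one_of_mem (hnd.filter q) (List.mem_filter.mpr ⟨hz, hq⟩)]
          norm_num
        · have : z ∉ L.filter q := fun hmem => hq (List.of_mem_filter hmem)
          rw [if_neg hq, List.count_eq_zero.mpr this]
          norm_num
      calc ((L.filter q).map (fun p => ((z :: xs).count p : Int))).sum
          = ((L.filter q).map (fun p => (xs.count p : Int) + (if p = z then (1:Int) else 0))).sum := by
            exact congrArg List.sum (List.map_congr_left (fun p _ => hsplit p))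
        _ = ((L.filter q).map (fun p => (xs.count p : Int))).sum
            + ((L.filter q).map (fun p => (if p = z then (1:Int) else 0))).sum := by
            rw [← List.sum_map_add]
        _ = ((xs.countP q) : Int) + (if q z then (1:Int) else 0) := by
            rw [ih L hnd hcov', hcnt, hone]
        _ = (((z :: xs).countP q) : Int) := by
            rw [List.countP_cons]
            by_cases hq : q z <;> simp [hq]

-- A's inner 'for p in freq' scan over a counter dict counts the represented multiset
theorem pvCounter_scan (xs : List Int) (K px c : Int) :
    (PySem.Dict.counter xs).keys.foldl
        (fun c p => if PySem.Int.bxor px p ≤ K then c + (PySem.Dict.counter xs).getD p 0 else c) c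
      = c + ((xs.countP (fun p => decide (PySem.Int.bxor px p ≤ K))) : Int) := by
  have hcong : (PySem.Dict.counter xs).keys.foldl
        (fun c p => if PySem.Int.bxor px p ≤ K then c + (PySem.Dict.counter xs).getD p 0 else c) c
      = (PySem.Dict.counter xs).keys.foldl
        (fun c p => if PySem.Int.bxor px p ≤ K then c + ((xs.count p : Int)) else c) c := by
    apply PySem.List.foldl_congr_mem
    intro acc p _
    rw [PySem.Dict.getD_counter]
  rw [hcong, PySem.List.foldl_ite_eq_foldl_filter (fun p => PySem.Int.bxor px p ≤ K)
        (fun c p => c + ((xs.count p : Int))), PySem.Dict.keys_counter,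
      PySem.List.foldl_add]
  rw [pvSum_count_filter (fun p => decide (PySem.Int.bxor px p ≤ K)) xs (PySem.Set.ofList xs)
        (PySem.Set.nodup_ofList xs) (fun y hy => (PySem.Set.mem_ofList xs y).mpr hy)]

-- A's loop invariant
theorem pvLoopA (K : Int) : ∀ (r seen : List Int) (x c : Int),
    (r.foldl (pvStepA K) (c, x, PySem.Dict.counter seen)).1
      = c + pvPairL K (seen ++ pvPrefsT x r) - pvPairL K seen := by
  intro r
  induction r with
  | nil => intro seen x c; simp [pvPrefsT]
  | cons n r ih =>
      intro seen x c
      have h1 : pvStepA K (c, x, PySem.Dict.counter seen) n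
          = (c + ((seen.countP (fun p => decide (PySem.Int.bxor (PySem.Int.bxor x n) p ≤ K))) : Int),
             PySem.Int.bxor x n,
             PySem.Dict.counter (seen ++ [PySem.Int.bxor x n])) := by
        unfold pvStepA
        rw [PySem.Dict.counter_append_singleton]
        exact congrArg (fun v => (v, PySem.Int.bxor x n,
          (PySem.Dict.counter seen).modify (PySem.Int.bxor x n) 0 (· + 1)))
          (pvCounter_scan seen K (PySem.Int.bxor x n) c)
      rw [List.foldl_cons, h1, ih (seen ++ [PySem.Int.bxor x n]) (PySem.Int.bxor x n) _]
      rw [pvPairL_append K (PySem.Int.bxor x n) seen]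
      have h2 : seen ++ [PySem.Int.bxor x n] ++ pvPrefsT (PySem.Int.bxor x n) r
          = seen ++ pvPrefsT x (n :: r) := by
        rw [List.append_assoc]
        rfl
      rw [h2]
      ring

-- B's inner loop: running subarray xors are the seeded prefix xors
theorem pvInner (K : Int) : ∀ (s : List Int) (x t : Int),
    (s.foldl
      (fun (st : Int × Int) num =>
        let y := PySem.Int.bxor st.1 num
        (y, if y ≤ K then st.2 + 1 else st.2)) (x, t)).2
      = t + (((pvPrefsT x s).countP (fun y => decide (y ≤ K))) : Int) := by
  intro s
  induction s with
  | nil => intro x t; simp [pvPrefsT]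
  | cons n s ih =>
      intro x t
      rw [List.foldl_cons]
      show (s.foldl _ (PySem.Int.bxor x n,
        if PySem.Int.bxor x n ≤ K then t + 1 else t)).2 = _
      rw [ih]
      simp only [pvPrefsT, List.countP_cons]
      by_cases h : PySem.Int.bxor x n ≤ K <;> simp [h] <;> omega

theorem pvAltGo_spec (K : Int) : ∀ (s : List Int) (t : Int), pvAltGo K s t = t + pvPairS K s := by
  intro s
  induction s with
  | nil => intro t; simp [pvAltGo, pvPairS]
  | cons n r ih =>
      intro t
      show pvAltGo K r _ = _
      rw [ih, pvInner K (n :: r) 0 t]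
      simp only [pvPairS]
      ring

-- ===== VERDICT (by name: the statement is the Claim_ definition above) =====
theorem count_xor_less_equal_k_spec : Claim_equal_count_xor_less_equal_k := by
  intro a K _
  unfold Spec_count_xor_less_equal_k count_xor_less_equal_k count_xor_less_equal_k_alt
  have hinit : ((PySem.Dict.empty : PySem.Dict Int Int).insert 0 1) = PySem.Dict.counter [0] := by
    decide
  rw [hinit, pvLoopA K a [0] 0 0, pvAltGo_spec K a 0]
  have h0 : pvPairL K ([0] ++ pvPrefsT 0 a) = pvPairS K a := by
    rw [List.singleton_append]
    exact pvPairL_eq_pairS K a 0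
  rw [h0]
  simp [pvPairL]
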